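-- pv_equiv track=rewrite | github.com/Strategizing/heiwa-universe | runtime/fleets/hub/cognition/intent_normalizer.py | _missing_details
-- ===== SOURCE A (Python) =====
-- def _missing_details(text: str, intent: str) -> list[str]:
--     lowered = text.lower()
--     out: list[str] = []
--
--     if len(text.split()) < 8:
--         out.append("primary objective and desired outcome")
--
--     if intent == "build":
--         if not any(k in lowered for k in ("python", "typescript", "javascript", "go", "rust", "java")):
--             out.append("preferred language or framework")
--         if not any(k in lowered for k in ("file", "api", "service", "cli", "script", "app")):
--             out.append("expected output artifact")
--     elif intent == "research":
--         if not any(k in lowered for k in ("today", "latest", "recent", "202", "this week", "this month")):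
--             out.append("time horizon / recency window")
--         if not any(k in lowered for k in ("compare", "best", "tradeoff", "criteria", "pros", "cons")):
--             out.append("evaluation criteria")
--     elif intent == "deploy":
--         if not any(k in lowered for k in ("railway", "production", "staging", "service", "environment")):
--             out.append("target environment or service")
--         if not any(k in lowered for k in ("rollback", "safe", "health", "downtime")):
--             out.append("rollback and safety requirements")
--     elif intent == "operate":
--         if not any(k in lowered for k in ("service", "api", "worker", "database", "nats", "queue", "agent")):
--             out.append("affected system/component")
--     elif intent == "automation":
--         if not any(k in lowered for k in ("hourly", "daily", "weekly", "schedule", "trigger", "event")):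
--             out.append("trigger cadence or event source")
--         if not any(k in lowered for k in ("discord", "notion", "email", "slack", "webhook", "output")):
--             out.append("destination for automation outputs")
--
--     return out
-- ===== SOURCE B (Python) =====
-- # Flat (intent, keyword-frozenset, prompt) table; one global keyword scan builds a
-- # hit-set, then prompts are selected by set-disjointness instead of per-rule text scans.
-- RULES = [
--     ("build", frozenset(("python", "typescript", "javascript", "go", "rust", "java")),
--      "preferred language or framework"),
--     ("build", frozenset(("file", "api", "service", "cli", "script", "app")),
--      "expected output artifact"),
--     ("research", frozenset(("today", "latest", "recent", "202", "this week", "this month")),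
--      "time horizon / recency window"),
--     ("research", frozenset(("compare", "best", "tradeoff", "criteria", "pros", "cons")),
--      "evaluation criteria"),
--     ("deploy", frozenset(("railway", "production", "staging", "service", "environment")),
--      "target environment or service"),
--     ("deploy", frozenset(("rollback", "safe", "health", "downtime")),
--      "rollback and safety requirements"),
--     ("operate", frozenset(("service", "api", "worker", "database", "nats", "queue", "agent")),
--      "affected system/component"),
--     ("automation", frozenset(("hourly", "daily", "weekly", "schedule", "trigger", "event")),
--      "trigger cadence or event source"),
--     ("automation", frozenset(("discord", "notion", "email", "slack", "webhook", "output")),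
--      "destination for automation outputs"),
-- ]
--
--
-- def _keyword_hits(lowered: str) -> set[str]:
--     # one pass over ALL keywords of the whole table: which ones occur in the text
--     return {k for _i, kws, _p in RULES for k in kws if k in lowered}
--
--
-- def _missing_details(text: str, intent: str) -> list[str]:
--     lowered = text.lower()
--     hits = _keyword_hits(lowered)
--     out = ["primary objective and desired outcome"] if len(text.split()) < 8 else []
--     # a rule's prompt is missing exactly when none of its keywords was hit
--     out += [p for i, kws, p in RULES if i == intent and hits.isdisjoint(kws)]
--     return out
-- ===== Notes on version B (the rewrite author's own statement) =====
-- stated objective: alternative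
-- what changed: Replaces A's five-way if/elif chain (each branch scanning the text per rule and appending) by a flat (intent, keyword-set, prompt) table: one global pass over ALL keywords builds a hit-set once, then prompts are selected by set-disjointness of each rule's keyword set against that hit-set, as a filtering comprehension.
import Mathlib
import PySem

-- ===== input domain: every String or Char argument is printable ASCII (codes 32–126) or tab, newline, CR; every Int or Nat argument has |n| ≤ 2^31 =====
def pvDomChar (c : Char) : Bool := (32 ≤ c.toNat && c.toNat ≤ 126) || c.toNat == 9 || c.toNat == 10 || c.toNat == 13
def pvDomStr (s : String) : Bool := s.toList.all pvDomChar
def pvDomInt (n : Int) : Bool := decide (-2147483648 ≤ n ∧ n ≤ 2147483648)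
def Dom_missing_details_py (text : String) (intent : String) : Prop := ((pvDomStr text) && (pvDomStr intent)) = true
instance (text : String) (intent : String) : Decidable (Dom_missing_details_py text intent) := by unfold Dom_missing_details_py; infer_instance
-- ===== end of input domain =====

-- ===== PORT A =====
-- B replaces A's if/elif branch chain by a flat rule table and a precomputed
-- keyword hit-set consumed via set-disjointness (objective: alternative).
def missing_details_py (text : String) (intent : String) : List String :=
  let lowered := PySem.Str.lower text
  let out : List String := []
  let out := if (PySem.Str.split₀ text).length < 8 then out ++ ["primary objective and desired outcome"] else out
  if intent == "build" then
    let out := if !((["python", "typescript", "javascript", "go", "rust", "java"] : List String).any (fun k => PySem.Str.isIn k lowered)) then out ++ ["preferred language or framework"] else out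
    let out := if !((["file", "api", "service", "cli", "script", "app"] : List String).any (fun k => PySem.Str.isIn k lowered)) then out ++ ["expected output artifact"] else out
    out
  else if intent == "research" then
    let out := if !((["today", "latest", "recent", "202", "this week", "this month"] : List String).any (fun k => PySem.Str.isIn k lowered)) then out ++ ["time horizon / recency window"] else out
    let out := if !((["compare", "best", "tradeoff", "criteria", "pros", "cons"] : List String).any (fun k => PySem.Str.isIn k lowered)) then out ++ ["evaluation criteria"] else out
    out
  else if intent == "deploy" then
    let out := if !((["railway", "production", "staging", "service", "environment"] : List String).any (fun k => PySem.Str.isIn k lowered)) then out ++ ["target environment or service"] else out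
    let out := if !((["rollback", "safe", "health", "downtime"] : List String).any (fun k => PySem.Str.isIn k lowered)) then out ++ ["rollback and safety requirements"] else out
    out
  else if intent == "operate" then
    let out := if !((["service", "api", "worker", "database", "nats", "queue", "agent"] : List String).any (fun k => PySem.Str.isIn k lowered)) then out ++ ["affected system/component"] else out
    out
  else if intent == "automation" then
    let out := if !((["hourly", "daily", "weekly", "schedule", "trigger", "event"] : List String).any (fun k => PySem.Str.isIn k lowered)) then out ++ ["trigger cadence or event source"] else out
    let out := if !((["discord", "notion", "email", "slack", "webhook", "output"] : List String).any (fun k => PySem.Str.isIn k lowered)) then out ++ ["destination for automation outputs"] else out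
    out
  else
    out

-- ===== PORT B =====
-- flat (intent, keyword set, prompt) table; keyword sets are frozensets in Source B → PySem.Set
def pvRules : List (String × PySem.Set String × String) :=
  [ ("build", PySem.Set.ofList ["python", "typescript", "javascript", "go", "rust", "java"], "preferred language or framework")
  , ("build", PySem.Set.ofList ["file", "api", "service", "cli", "script", "app"], "expected output artifact")
  , ("research", PySem.Set.ofList ["today", "latest", "recent", "202", "this week", "this month"], "time horizon / recency window")
  , ("research", PySem.Set.ofList ["compare", "best", "tradeoff", "criteria", "pros", "cons"], "evaluation criteria")
  , ("deploy", PySem.Set.ofList ["railway", "production", "staging", "service", "environment"], "target environment or service")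
  , ("deploy", PySem.Set.ofList ["rollback", "safe", "health", "downtime"], "rollback and safety requirements")
  , ("operate", PySem.Set.ofList ["service", "api", "worker", "database", "nats", "queue", "agent"], "affected system/component")
  , ("automation", PySem.Set.ofList ["hourly", "daily", "weekly", "schedule", "trigger", "event"], "trigger cadence or event source")
  , ("automation", PySem.Set.ofList ["discord", "notion", "email", "slack", "webhook", "output"], "destination for automation outputs") ]

-- _keyword_hits(lowered): the set of table keywords occurring in `lowered`
def pvHits (lowered : String) : PySem.Set String :=
  PySem.Set.ofList ((pvRules.flatMap (fun r => r.2.1)).filter (fun k => PySem.Str.isIn k lowered))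

def missing_details_py_alt (text : String) (intent : String) : List String :=
  let lowered := PySem.Str.lower text
  let hits : PySem.Set String := pvHits lowered
  let out : List String := if (PySem.Str.split₀ text).length < 8 then ["primary objective and desired outcome"] else []
  out ++ (pvRules.filter (fun r => r.1 == intent && PySem.Set.isdisjoint hits r.2.1)).map (fun r => r.2.2)

-- ===== PRECONDITION & SPEC =====
def Spec_missing_details_py (text : String) (intent : String) (out : List String) : Prop := out = missing_details_py_alt text intent
instance (text : String) (intent : String) (out : List String) : Decidable (Spec_missing_details_py text intent out) := by unfold Spec_missing_details_py; infer_instance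

-- ===== CLAIM (what is proved, stated in full; the proofs are below) =====
def Claim_equal_missing_details_py : Prop := ∀ (text : String) (intent : String), Dom_missing_details_py text intent → Spec_missing_details_py text intent (missing_details_py text intent)

-- ===== LEMMAS AND PROOFS =====

-- the hit-set is disjoint from t (all of whose members are table keywords) iff
-- no keyword of t occurs in the lowered text
theorem pv_disj (lowered : String) (t : List String)
    (h : ∀ k ∈ t, k ∈ pvRules.flatMap (fun r => r.2.1)) :
    PySem.Set.isdisjoint (pvHits lowered) t
      = !(t.any (fun k => PySem.Str.isIn k lowered)) := by
  unfold pvHits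
  rw [Bool.eq_iff_iff]
  simp only [PySem.Set.isdisjoint_iff, PySem.Set.mem_ofList, List.mem_filter,
    Bool.not_eq_eq_eq_not, Bool.not_true, List.any_eq_false]
  constructor
  · intro hd k hk
    by_cases hi : PySem.Str.isIn k lowered = true
    · exact absurd hk (hd k ⟨h k hk, hi⟩)
    · simpa using hi
  · intro hn k hk hkt
    exact hn k hkt hk.2

theorem pv_disj₁ (lowered : String) :
    PySem.Set.isdisjoint (pvHits lowered) (PySem.Set.ofList ["python", "typescript", "javascript", "go", "rust", "java"])
      = !((["python", "typescript", "javascript", "go", "rust", "java"] : List String).any (fun k => PySem.Str.isIn k lowered)) := by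
  rw [show (PySem.Set.ofList ["python", "typescript", "javascript", "go", "rust", "java"] : List String) = ["python", "typescript", "javascript", "go", "rust", "java"] from by decide]
  exact pv_disj lowered _ (by decide)

theorem pv_disj₂ (lowered : String) :
    PySem.Set.isdisjoint (pvHits lowered) (PySem.Set.ofList ["file", "api", "service", "cli", "script", "app"])
      = !((["file", "api", "service", "cli", "script", "app"] : List String).any (fun k => PySem.Str.isIn k lowered)) := by
  rw [show (PySem.Set.ofList ["file", "api", "service", "cli", "script", "app"] : List String) = ["file", "api", "service", "cli", "script", "app"] from by decide]
  exact pv_disj lowered _ (by decide)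

theorem pv_disj₃ (lowered : String) :
    PySem.Set.isdisjoint (pvHits lowered) (PySem.Set.ofList ["today", "latest", "recent", "202", "this week", "this month"])
      = !((["today", "latest", "recent", "202", "this week", "this month"] : List String).any (fun k => PySem.Str.isIn k lowered)) := by
  rw [show (PySem.Set.ofList ["today", "latest", "recent", "202", "this week", "this month"] : List String) = ["today", "latest", "recent", "202", "this week", "this month"] from by decide]
  exact pv_disj lowered _ (by decide)

theorem pv_disj₄ (lowered : String) :
    PySem.Set.isdisjoint (pvHits lowered) (PySem.Set.ofList ["compare", "best", "tradeoff", "criteria", "pros", "cons"])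
      = !((["compare", "best", "tradeoff", "criteria", "pros", "cons"] : List String).any (fun k => PySem.Str.isIn k lowered)) := by
  rw [show (PySem.Set.ofList ["compare", "best", "tradeoff", "criteria", "pros", "cons"] : List String) = ["compare", "best", "tradeoff", "criteria", "pros", "cons"] from by decide]
  exact pv_disj lowered _ (by decide)

theorem pv_disj₅ (lowered : String) :
    PySem.Set.isdisjoint (pvHits lowered) (PySem.Set.ofList ["railway", "production", "staging", "service", "environment"])
      = !((["railway", "production", "staging", "service", "environment"] : List String).any (fun k => PySem.Str.isIn k lowered)) := by
  rw [show (PySem.Set.ofList ["railway", "production", "staging", "service", "environment"] : List String) = ["railway", "production", "staging", "service", "environment"] from by decide]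
  exact pv_disj lowered _ (by decide)

theorem pv_disj₆ (lowered : String) :
    PySem.Set.isdisjoint (pvHits lowered) (PySem.Set.ofList ["rollback", "safe", "health", "downtime"])
      = !((["rollback", "safe", "health", "downtime"] : List String).any (fun k => PySem.Str.isIn k lowered)) := by
  rw [show (PySem.Set.ofList ["rollback", "safe", "health", "downtime"] : List String) = ["rollback", "safe", "health", "downtime"] from by decide]
  exact pv_disj lowered _ (by decide)

theorem pv_disj₇ (lowered : String) :
    PySem.Set.isdisjoint (pvHits lowered) (PySem.Set.ofList ["service", "api", "worker", "database", "nats", "queue", "agent"])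
      = !((["service", "api", "worker", "database", "nats", "queue", "agent"] : List String).any (fun k => PySem.Str.isIn k lowered)) := by
  rw [show (PySem.Set.ofList ["service", "api", "worker", "database", "nats", "queue", "agent"] : List String) = ["service", "api", "worker", "database", "nats", "queue", "agent"] from by decide]
  exact pv_disj lowered _ (by decide)

theorem pv_disj₈ (lowered : String) :
    PySem.Set.isdisjoint (pvHits lowered) (PySem.Set.ofList ["hourly", "daily", "weekly", "schedule", "trigger", "event"])
      = !((["hourly", "daily", "weekly", "schedule", "trigger", "event"] : List String).any (fun k => PySem.Str.isIn k lowered)) := by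
  rw [show (PySem.Set.ofList ["hourly", "daily", "weekly", "schedule", "trigger", "event"] : List String) = ["hourly", "daily", "weekly", "schedule", "trigger", "event"] from by decide]
  exact pv_disj lowered _ (by decide)

theorem pv_disj₉ (lowered : String) :
    PySem.Set.isdisjoint (pvHits lowered) (PySem.Set.ofList ["discord", "notion", "email", "slack", "webhook", "output"])
      = !((["discord", "notion", "email", "slack", "webhook", "output"] : List String).any (fun k => PySem.Str.isIn k lowered)) := by
  rw [show (PySem.Set.ofList ["discord", "notion", "email", "slack", "webhook", "output"] : List String) = ["discord", "notion", "email", "slack", "webhook", "output"] from by decide]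
  exact pv_disj lowered _ (by decide)

-- ===== VERDICT (by name: the statement is the Claim_ definition above) =====
set_option maxHeartbeats 2000000 in
theorem missing_details_py_spec : Claim_equal_missing_details_py := by
  intro text intent _
  unfold Spec_missing_details_py missing_details_py missing_details_py_alt
  by_cases h1 : intent = "build"
  · simp only [h1, pvRules, List.filter_cons, List.filter_nil, List.map_cons, List.map_nil, pv_disj₁, pv_disj₂]
    simp only [show (("build":String) == "build") = true from rfl,
      show (("research":String) == "build") = false from rfl,
      show (("build":String) == "research") = false from rfl,
      show (("deploy":String) == "build") = false from rfl,
      show (("build":String) == "deploy") = false from rfl,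
      show (("operate":String) == "build") = false from rfl,
      show (("build":String) == "operate") = false from rfl,
      show (("automation":String) == "build") = false from rfl,
      show (("build":String) == "automation") = false from rfl,
      Bool.true_and, Bool.false_and, if_false, Bool.false_eq_true]
    split_ifs <;> simp
  by_cases h2 : intent = "research"
  · simp only [h2, pvRules, List.filter_cons, List.filter_nil, List.map_cons, List.map_nil, pv_disj₃, pv_disj₄]
    simp only [show (("build":String) == "research") = false from rfl,
      show (("research":String) == "build") = false from rfl,
      show (("research":String) == "research") = true from rfl,
      show (("deploy":String) == "research") = false from rfl,
      show (("research":String) == "deploy") = false from rfl,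
      show (("operate":String) == "research") = false from rfl,
      show (("research":String) == "operate") = false from rfl,
      show (("automation":String) == "research") = false from rfl,
      show (("research":String) == "automation") = false from rfl,
      Bool.true_and, Bool.false_and, if_false, Bool.false_eq_true]
    split_ifs <;> simp
  by_cases h3 : intent = "deploy"
  · simp only [h3, pvRules, List.filter_cons, List.filter_nil, List.map_cons, List.map_nil, pv_disj₅, pv_disj₆]
    simp only [show (("build":String) == "deploy") = false from rfl,
      show (("deploy":String) == "build") = false from rfl,
      show (("research":String) == "deploy") = false from rfl,
      show (("deploy":String) == "research") = false from rfl,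
      show (("deploy":String) == "deploy") = true from rfl,
      show (("operate":String) == "deploy") = false from rfl,
      show (("deploy":String) == "operate") = false from rfl,
      show (("automation":String) == "deploy") = false from rfl,
      show (("deploy":String) == "automation") = false from rfl,
      Bool.true_and, Bool.false_and, if_false, Bool.false_eq_true]
    split_ifs <;> simp
  by_cases h4 : intent = "operate"
  · simp only [h4, pvRules, List.filter_cons, List.filter_nil, List.map_cons, List.map_nil, pv_disj₇]
    simp only [show (("build":String) == "operate") = false from rfl,
      show (("operate":String) == "build") = false from rfl,
      show (("research":String) == "operate") = false from rfl,
      show (("operate":String) == "research") = false from rfl,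
      show (("deploy":String) == "operate") = false from rfl,
      show (("operate":String) == "deploy") = false from rfl,
      show (("operate":String) == "operate") = true from rfl,
      show (("automation":String) == "operate") = false from rfl,
      show (("operate":String) == "automation") = false from rfl,
      Bool.true_and, Bool.false_and, if_false, Bool.false_eq_true]
    split_ifs <;> simp
  by_cases h5 : intent = "automation"
  · simp only [h5, pvRules, List.filter_cons, List.filter_nil, List.map_cons, List.map_nil, pv_disj₈, pv_disj₉]
    simp only [show (("build":String) == "automation") = false from rfl,
      show (("automation":String) == "build") = false from rfl,
      show (("research":String) == "automation") = false from rfl,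
      show (("automation":String) == "research") = false from rfl,
      show (("deploy":String) == "automation") = false from rfl,
      show (("automation":String) == "deploy") = false from rfl,
      show (("operate":String) == "automation") = false from rfl,
      show (("automation":String) == "operate") = false from rfl,
      show (("automation":String) == "automation") = true from rfl,
      Bool.true_and, Bool.false_and, if_false, Bool.false_eq_true]
    split_ifs <;> simp
  · simp only [pvRules, List.filter_cons, List.filter_nil, List.map_cons, List.map_nil,
      beq_iff_eq, Ne.symm h1, Ne.symm h2, Ne.symm h3, Ne.symm h4, Ne.symm h5,
      decide_false, Bool.false_and, if_false, h1, h2, h3, h4, h5, if_neg, List.append_nil,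
      Bool.false_eq_true, ite_false]
    simp [h1, h2, h3, h4, h5, Ne.symm h1, Ne.symm h2, Ne.symm h3, Ne.symm h4, Ne.symm h5]
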